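-- pv_equiv track=rewrite | github.com/kaladhar-mummadi/hackerrank | Algorithms/strings/Mars Exploration.py | calcChange
-- ===== SOURCE A (Python) =====
-- def calcChange(str):
--     i = 0
--     res = 0
--     strLen = len(str)
--     while i < 3:
--         j = i
--         while j < strLen:
--             if (i == 0 or i == 2) and str[j] != 'S':
--                 res += 1
--             elif i == 1 and str[j] != 'O':
--                 res += 1
--             j += 3
--         i += 1
--     return res
-- ===== SOURCE B (Python) =====
-- def calcChange(str):
--     res = 0
--     for i in range(len(str)):
--         if str[i] != 'SOS'[i % 3]:
--             res += 1
--     return res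
-- ===== Notes on version B (the rewrite author's own statement) =====
-- stated objective: simpler
-- what changed: Replaces A's three interleaved stride-3 sweeps (one per residue class, with per-pass branch logic on i) by a single left-to-right pass that compares each character to the repeating S,O,S pattern selected by index mod 3, keeping one counter.
import Mathlib
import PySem

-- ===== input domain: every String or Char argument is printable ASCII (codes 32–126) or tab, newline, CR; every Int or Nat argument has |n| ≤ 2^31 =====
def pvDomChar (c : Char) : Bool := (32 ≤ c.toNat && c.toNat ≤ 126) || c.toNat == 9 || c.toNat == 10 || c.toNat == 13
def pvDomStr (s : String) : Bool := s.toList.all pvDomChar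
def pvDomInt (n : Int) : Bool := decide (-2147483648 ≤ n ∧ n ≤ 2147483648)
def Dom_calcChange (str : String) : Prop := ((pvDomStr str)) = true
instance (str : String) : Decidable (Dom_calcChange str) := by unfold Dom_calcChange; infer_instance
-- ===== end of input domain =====

-- B replaces A's three stride-3 sweeps with one left-to-right pass comparing each char to the repeating S,O,S pattern by index mod 3 (simpler; same cost).


-- ===== PORT A =====
-- inner 'while j < strLen' loop of pass i (j steps by 3); str[j] is always in range here,
-- so indexing via getElem! is exact.
def calcChangeInner (cs : List Char) (i : Nat) (j : Nat) (res : Int) : Int :=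
  if j < cs.length then
    calcChangeInner cs i (j + 3)
      (if (i = 0 ∨ i = 2) ∧ cs[j]! ≠ 'S' then res + 1
       else if i = 1 ∧ cs[j]! ≠ 'O' then res + 1
       else res)
  else res
termination_by cs.length - j

-- outer 'while i < 3' loop
def calcChangeOuter (cs : List Char) (i : Nat) (res : Int) : Int :=
  if i < 3 then calcChangeOuter cs (i + 1) (calcChangeInner cs i i res) else res
termination_by 3 - i

def calcChange (str : String) : Int := calcChangeOuter str.toList 0 0

-- ===== PORT B =====
-- 'for i in range(len(str))' loop; str[i] and 'SOS'[i % 3] are always in range, getElem! is exact.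
def calcChangeAltLoop (cs sos : List Char) (i : Nat) (res : Int) : Int :=
  if i < cs.length then
    calcChangeAltLoop cs sos (i + 1) (if cs[i]! ≠ sos[i % 3]! then res + 1 else res)
  else res
termination_by cs.length - i

def calcChange_alt (str : String) : Int := calcChangeAltLoop str.toList "SOS".toList 0 0

-- ===== PRECONDITION & SPEC =====
def Spec_calcChange (str : String) (out : Int) : Prop := out = calcChange_alt str
instance (str : String) (out : Int) : Decidable (Spec_calcChange str out) := by unfold Spec_calcChange; infer_instance

-- ===== CLAIM (what is proved, stated in full; the proofs are below) =====
def Claim_equal_calcChange : Prop := ∀ (str : String), Dom_calcChange str → Spec_calcChange str (calcChange str)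

-- ===== LEMMAS AND PROOFS =====

-- mismatch indicator at index j (expected char 'SOS'[j % 3])
def pvMis (cs : List Char) (j : Nat) : Int :=
  if cs[j]! ≠ (if j % 3 = 1 then 'O' else 'S') then 1 else 0

-- accumulator-free count over the stride j, j+3, j+6, …
def pvCntS (cs : List Char) (j : Nat) : Int :=
  if j < cs.length then pvMis cs j + pvCntS cs (j + 3) else 0
termination_by cs.length - j

-- accumulator-free count over all indices from j
def pvCntA (cs : List Char) (j : Nat) : Int :=
  if j < cs.length then pvMis cs j + pvCntA cs (j + 1) else 0
termination_by cs.length - j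

lemma sos_get (j : Nat) : ("SOS".toList)[j % 3]! = (if j % 3 = 1 then 'O' else 'S') := by
  have h : j % 3 = 0 ∨ j % 3 = 1 ∨ j % 3 = 2 := by omega
  rcases h with h | h | h <;> simp [h]

lemma inner_eq (cs : List Char) (i : Nat) (hi : i < 3) :
    ∀ m j res, cs.length - j ≤ m → j % 3 = i →
      calcChangeInner cs i j res = res + pvCntS cs j := by
  intro m
  induction m with
  | zero =>
    intro j res hm _
    unfold calcChangeInner pvCntS
    have : ¬ j < cs.length := by omega
    simp [this]
  | succ m ih =>
    intro j res hm hj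
    unfold calcChangeInner pvCntS
    by_cases h : j < cs.length
    · simp only [h, if_true]
      rw [ih (j + 3) _ (by omega) (by omega)]
      have hstep :
          (if (i = 0 ∨ i = 2) ∧ cs[j]! ≠ 'S' then res + 1
           else if i = 1 ∧ cs[j]! ≠ 'O' then res + 1 else res)
          = res + pvMis cs j := by
        unfold pvMis
        interval_cases i <;> simp [hj] <;> split <;> simp_all
      rw [hstep]; ring
    · simp [h]
  -- (j % 3 = i is preserved by j + 3)

lemma alt_eq (cs : List Char) :
    ∀ m j res, cs.length - j ≤ m →
      calcChangeAltLoop cs "SOS".toList j res = res + pvCntA cs j := by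
  intro m
  induction m with
  | zero =>
    intro j res hm
    unfold calcChangeAltLoop pvCntA
    have : ¬ j < cs.length := by omega
    simp [this]
  | succ m ih =>
    intro j res hm
    unfold calcChangeAltLoop pvCntA
    by_cases h : j < cs.length
    · simp only [h, if_true]
      rw [ih (j + 1) _ (by omega)]
      rw [sos_get j]
      unfold pvMis
      split_ifs <;> ring
    · simp [h]

lemma pvCntA_eq (cs : List Char) (j : Nat) :
    pvCntA cs j = if j < cs.length then pvMis cs j + pvCntA cs (j + 1) else 0 := by
  rw [pvCntA]

lemma pvCntS_eq (cs : List Char) (j : Nat) :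
    pvCntS cs j = if j < cs.length then pvMis cs j + pvCntS cs (j + 3) else 0 := by
  rw [pvCntS]

-- one flat pass = the three strided passes
lemma cntA_eq_three (cs : List Char) :
    ∀ m j, cs.length - j ≤ m →
      pvCntA cs j = pvCntS cs j + pvCntS cs (j + 1) + pvCntS cs (j + 2) := by
  intro m
  induction m with
  | zero =>
    intro j hm
    unfold pvCntA pvCntS
    have h0 : ¬ j < cs.length := by omega
    have h1 : ¬ j + 1 < cs.length := by omega
    have h2 : ¬ j + 2 < cs.length := by omega
    simp [h0, h1, h2]
  | succ m ih =>
    intro j hm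
    by_cases h : j < cs.length
    · have hA : pvCntA cs j = pvMis cs j + pvCntA cs (j + 1) := by
        rw [pvCntA_eq, if_pos h]
      have hS : pvCntS cs j = pvMis cs j + pvCntS cs (j + 3) := by
        rw [pvCntS_eq, if_pos h]
      rw [hA, ih (j + 1) (by omega), hS]
      have : j + 1 + 2 = j + 3 := by omega
      rw [this]; ring
    · unfold pvCntA pvCntS
      have h1 : ¬ j + 1 < cs.length := by omega
      have h2 : ¬ j + 2 < cs.length := by omega
      simp [h, h1, h2]

-- ===== VERDICT (by name: the statement is the Claim_ definition above) =====
theorem calcChange_spec : Claim_equal_calcChange := by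
  intro str _
  unfold Spec_calcChange calcChange calcChange_alt
  set cs := str.toList with hcs
  have hout : calcChangeOuter cs 0 0
      = pvCntS cs 0 + pvCntS cs 1 + pvCntS cs 2 := by
    unfold calcChangeOuter; simp only [show (0:Nat) < 3 from by omega, if_true]
    unfold calcChangeOuter; simp only [show (1:Nat) < 3 from by omega, if_true]
    unfold calcChangeOuter; simp only [show (2:Nat) < 3 from by omega, if_true]
    unfold calcChangeOuter; simp only [show ¬ (3:Nat) < 3 from by omega, if_false]
    rw [inner_eq cs 0 (by omega) cs.length 0 _ (by omega) (by omega),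
        inner_eq cs 1 (by omega) cs.length 1 _ (by omega) (by omega),
        inner_eq cs 2 (by omega) cs.length 2 _ (by omega) (by omega)]
    ring
  rw [hout, alt_eq cs cs.length 0 0 (by omega), cntA_eq_three cs cs.length 0 (by omega)]
  ring
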